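-- pv_equiv track=rewrite | github.com/facebookresearch/MetaCLIP | metaclip/curation/substr_matching.py | spacing
-- ===== SOURCE A (Python) =====
-- def spacing(text):
--     puncts_to_wrap = [",", ".", ";", ":", "?", "!", "`"]
--     chars_to_space = ["\t", "\n", "\r"]
--
--     spaced_text = f" {text} "
--     for punct_to_wrap in puncts_to_wrap:
--         spaced_text = spaced_text.replace(punct_to_wrap, f" {punct_to_wrap} ")
--     for char_to_space in chars_to_space:
--         spaced_text = spaced_text.replace(char_to_space, " ")
--     return spaced_text
-- ===== SOURCE B (Python) =====
-- def spacing(text):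
--     puncts_to_wrap = ",.;:?!`"
--     chars_to_space = "\t\n\r"
--     out = [" "]
--     for c in text:
--         if c in puncts_to_wrap:
--             out.append(" " + c + " ")
--         elif c in chars_to_space:
--             out.append(" ")
--         else:
--             out.append(c)
--     out.append(" ")
--     return "".join(out)
-- ===== Notes on version B (the rewrite author's own statement) =====
-- stated objective: alternative
-- what changed: Single left-to-right pass that appends a space-padded piece per punctuation character, a lone space per tab/newline/CR and the character itself otherwise, joined once, instead of ten sequential str.replace passes over the whole string.
import Mathlib
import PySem

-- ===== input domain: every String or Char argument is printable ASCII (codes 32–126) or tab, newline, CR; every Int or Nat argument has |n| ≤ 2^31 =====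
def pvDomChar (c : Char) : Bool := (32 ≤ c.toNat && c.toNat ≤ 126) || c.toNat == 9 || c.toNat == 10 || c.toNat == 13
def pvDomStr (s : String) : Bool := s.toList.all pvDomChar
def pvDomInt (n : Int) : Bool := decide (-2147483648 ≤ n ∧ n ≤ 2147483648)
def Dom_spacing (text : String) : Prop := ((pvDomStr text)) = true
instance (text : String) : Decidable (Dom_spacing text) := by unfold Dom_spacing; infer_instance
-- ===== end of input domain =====

-- B replaces A's ten sequential str.replace passes with one left-to-right pass that appends
-- each character's padded piece directly; equivalence of the return value is proved for all strings.

-- ===== PORT A =====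
def spacing (text : String) : String :=
  let punctsToWrap : List String := [",", ".", ";", ":", "?", "!", "`"]
  let charsToSpace : List String := ["\t", "\n", "\r"]
  let spacedText := " " ++ text ++ " "
  let spacedText := punctsToWrap.foldl
    (fun s p => PySem.Str.replace s p (" " ++ p ++ " ")) spacedText
  let spacedText := charsToSpace.foldl
    (fun s c => PySem.Str.replace s c " ") spacedText
  spacedText

-- ===== PORT B =====
def spacing_alt (text : String) : String :=
  let punctsToWrap : List Char := [',', '.', ';', ':', '?', '!', '`']
  let charsToSpace : List Char := ['\t', '\n', '\r']
  let out := text.toList.foldl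
    (fun acc c =>
      if punctsToWrap.contains c then acc ++ [' ', c, ' ']
      else if charsToSpace.contains c then acc ++ [' ']
      else acc ++ [c]) [' ']
  String.ofList (out ++ [' '])

-- ===== PRECONDITION & SPEC =====
def Spec_spacing (text : String) (out : String) : Prop := out = spacing_alt text
instance (text : String) (out : String) : Decidable (Spec_spacing text out) := by unfold Spec_spacing; infer_instance

-- ===== CLAIM (what is proved, stated in full; the proofs are below) =====
def Claim_equal_spacing : Prop := ∀ (text : String), Dom_spacing text → Spec_spacing text (spacing text)

-- ===== LEMMAS AND PROOFS =====

-- the per-character substitution performed by one single-character replace step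
def rep1 (o : Char) (new : List Char) (c : Char) : List Char :=
  if c = o then new else [c]

-- B's per-character piece
def piece (c : Char) : List Char :=
  if [',', '.', ';', ':', '?', '!', '`'].contains c then [' ', c, ' ']
  else if ['\t', '\n', '\r'].contains c then [' ']
  else [c]

-- A's whole pipeline of ten replace steps, at character-list level
def pipeline (l : List Char) : List Char :=
  ((((((((((l.flatMap (rep1 ',' [' ', ',', ' '])).flatMap (rep1 '.' [' ', '.', ' '])).flatMap
    (rep1 ';' [' ', ';', ' '])).flatMap (rep1 ':' [' ', ':', ' '])).flatMap
    (rep1 '?' [' ', '?', ' '])).flatMap (rep1 '!' [' ', '!', ' '])).flatMap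
    (rep1 '`' [' ', '`', ' '])).flatMap (rep1 '\t' [' '])).flatMap
    (rep1 '\n' [' '])).flatMap (rep1 '\r' [' ']))

-- Single-character replace is a flatMap of the per-character substitution.
theorem replace_go_single (o : Char) (new : List Char) :
    ∀ (l acc : List Char) (fuel : Nat), l.length ≤ fuel →
      PySem.Chars.replace.go [o] new fuel l acc
        = acc.reverse ++ l.flatMap (rep1 o new) := by
  intro l
  induction l with
  | nil =>
    intro acc fuel _
    cases fuel <;> simp [PySem.Chars.replace.go]
  | cons c t ih =>
    intro acc fuel hf
    cases fuel with
    | zero => simp at hf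
    | succ f =>
      simp only [List.length_cons, Nat.succ_le_succ_iff] at hf
      by_cases h : c = o
      · subst h
        simp [PySem.Chars.replace.go, List.isPrefixOf, ih _ f hf, rep1]
      · simp [PySem.Chars.replace.go, List.isPrefixOf, h,
          ih _ f hf, Ne.symm h, rep1]

theorem replace_single (o : Char) (new l : List Char) :
    PySem.Chars.replace l [o] new = l.flatMap (rep1 o new) := by
  simp [PySem.Chars.replace, replace_go_single o new l [] l.length le_rfl]

theorem pipeline_append (x y : List Char) :
    pipeline (x ++ y) = pipeline x ++ pipeline y := by
  simp [pipeline]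

theorem pipeline_single (c : Char) : pipeline [c] = piece c := by
  unfold pipeline piece rep1
  by_cases h1 : c = ',';  · subst h1; decide
  by_cases h2 : c = '.';  · subst h2; decide
  by_cases h3 : c = ';';  · subst h3; decide
  by_cases h4 : c = ':';  · subst h4; decide
  by_cases h5 : c = '?';  · subst h5; decide
  by_cases h6 : c = '!';  · subst h6; decide
  by_cases h7 : c = '`';  · subst h7; decide
  by_cases h8 : c = '\t'; · subst h8; decide
  by_cases h9 : c = '\n'; · subst h9; decide
  by_cases h10 : c = '\r'; · subst h10; decide
  simp [h1, h2, h3, h4, h5, h6, h7, h8, h9, h10]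

theorem pipeline_eq_flatMap (l : List Char) : pipeline l = l.flatMap piece := by
  induction l with
  | nil => simp [pipeline]
  | cons c t ih =>
    have h : (c :: t) = [c] ++ t := rfl
    rw [h, pipeline_append, pipeline_single, ih]
    simp

theorem pipeline_space : pipeline [' '] = [' '] := by decide

theorem spacingA_toList (text : String) :
    (spacing text).toList = pipeline ([' '] ++ text.toList ++ [' ']) := by
  simp only [spacing, List.foldl, PySem.Str.toList_replace, String.toList_append,
    show (" " : String).toList = [' '] from rfl,
    show ("," : String).toList = [','] from rfl,
    show ("." : String).toList = ['.'] from rfl,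
    show (";" : String).toList = [';'] from rfl,
    show (":" : String).toList = [':'] from rfl,
    show ("?" : String).toList = ['?'] from rfl,
    show ("!" : String).toList = ['!'] from rfl,
    show ("`" : String).toList = ['`'] from rfl,
    show ("\t" : String).toList = ['\t'] from rfl,
    show ("\n" : String).toList = ['\n'] from rfl,
    show ("\r" : String).toList = ['\r'] from rfl,
    replace_single, pipeline]
  rfl

theorem funB_eq :
    (fun (acc : List Char) (c : Char) =>
      if [',', '.', ';', ':', '?', '!', '`'].contains c then acc ++ [' ', c, ' ']
      else if ['\t', '\n', '\r'].contains c then acc ++ [' ']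
      else acc ++ [c]) = fun acc c => acc ++ piece c := by
  funext acc c
  simp only [piece]
  split_ifs <;> rfl

theorem foldl_app (g : Char → List Char) (l : List Char) :
    ∀ acc : List Char, l.foldl (fun a c => a ++ g c) acc = acc ++ l.flatMap g := by
  induction l with
  | nil => intro acc; simp
  | cons c t ih => intro acc; simp [List.foldl, ih]

theorem spacingB_toList (text : String) :
    (spacing_alt text).toList = [' '] ++ text.toList.flatMap piece ++ [' '] := by
  simp only [spacing_alt, String.toList_ofList]
  rw [funB_eq, foldl_app]

-- ===== VERDICT (by name: the statement is the Claim_ definition above) =====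
theorem spacing_spec : Claim_equal_spacing := by
  intro text _
  unfold Spec_spacing
  apply String.toList_inj.mp
  rw [spacingA_toList, spacingB_toList, pipeline_append, pipeline_append,
    pipeline_eq_flatMap text.toList, pipeline_space]
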